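-- pv_equiv track=rewrite | github.com/Jesusr1297/binarySearch | easy/inverseFactorial.py | solve
-- ===== SOURCE A (Python) =====
-- def solve(a):
--     n = 1
--     mult = 1
--     while mult < a:
--         n += 1
--         mult *= n
--     if mult == a:
--         return n
--     else:
--         return -1
-- ===== SOURCE B (Python) =====
-- def solve(a):
--     if a < 1:
--         return -1
--     q = a
--     n = 1
--     while q > 1:
--         n += 1
--         if q % n:
--             return -1
--         q //= n
--     return n
-- ===== Notes on version B (the rewrite author's own statement) =====
-- stated objective: alternative
-- what changed: Instead of multiplying an upward-running factorial until it reaches a, B factors a downward: it repeatedly divides the remaining quotient by the next successive integer, requiring exact divisibility, returning the last divisor once the quotient reaches one and a negative sentinel on any nonzero remainder or non-positive input.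
import Mathlib
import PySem

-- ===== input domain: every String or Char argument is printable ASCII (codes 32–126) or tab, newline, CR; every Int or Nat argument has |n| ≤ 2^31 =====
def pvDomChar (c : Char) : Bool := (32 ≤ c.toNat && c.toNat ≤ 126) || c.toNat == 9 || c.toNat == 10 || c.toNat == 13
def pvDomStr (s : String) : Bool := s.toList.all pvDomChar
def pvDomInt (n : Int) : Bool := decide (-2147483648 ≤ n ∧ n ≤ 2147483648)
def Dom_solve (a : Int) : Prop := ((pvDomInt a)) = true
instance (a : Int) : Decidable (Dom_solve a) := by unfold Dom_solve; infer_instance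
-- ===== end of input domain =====

-- B: instead of multiplying 1*2*3*... upward until the running factorial reaches a,
-- B factors a downward, dividing by successive integers 2,3,4,... with exact
-- divisibility; same return value, same O(n) step count (alternative decomposition).

-- ===== PORT A =====
-- while mult < a: n += 1; mult *= n    (invariant proofs 1 ≤ n, 1 ≤ mult carried for termination)
def solveLoopA (a n mult : Int) (hn : 1 ≤ n) (hm : 1 ≤ mult) : Int :=
  if h : mult < a then
    solveLoopA a (n + 1) (mult * (n + 1)) (by omega) (by nlinarith)
  else if mult = a then n else -1
termination_by (a - mult).toNat
decreasing_by
  have h1 : mult < mult * (n + 1) := by nlinarith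
  omega

def solve (a : Int) : Int := solveLoopA a 1 1 (by norm_num) (by norm_num)

-- ===== PORT B =====
-- while q > 1: n += 1; if q % n: return -1; q //= n
def solveLoopB (q n : Int) (hq : 1 ≤ q) (hn : 1 ≤ n) : Int :=
  if h : 1 < q then
    if hmod : PySem.Int.mod q (n + 1) ≠ 0 then -1
    else
      solveLoopB (PySem.Int.floordiv q (n + 1)) (n + 1)
        (by
          rw [PySem.Int.floordiv_eq_ediv_of_pos (by omega)]
          have hd : (n + 1) ∣ q := by
            have := (PySem.Int.mod_eq_zero_iff_dvd q (n + 1)).mp (by omega)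
            exact this
          obtain ⟨k, hk⟩ := hd
          have hk1 : 1 ≤ k := by nlinarith
          rw [hk, Int.mul_ediv_cancel_left _ (by omega)]
          exact hk1)
        (by omega)
  else n
termination_by q.toNat
decreasing_by
  rw [PySem.Int.floordiv_eq_ediv_of_pos (by omega)]
  have hd : (n + 1) ∣ q :=
    (PySem.Int.mod_eq_zero_iff_dvd q (n + 1)).mp (by omega)
  obtain ⟨k, hk⟩ := hd
  have hk1 : 1 ≤ k := by nlinarith
  have hqk : q / (n + 1) = k := by rw [hk, Int.mul_ediv_cancel_left _ (by omega)]
  have hkq : k < q := by nlinarith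
  rw [hqk]
  omega

def solve_alt (a : Int) : Int :=
  if h : a < 1 then -1 else solveLoopB a 1 (by omega) (by norm_num)

-- ===== PRECONDITION & SPEC =====
def Spec_solve (a : Int) (out : Int) : Prop := out = solve_alt a
instance (a : Int) (out : Int) : Decidable (Spec_solve a out) := by unfold Spec_solve; infer_instance

-- ===== CLAIM (what is proved, stated in full; the proofs are below) =====
def Claim_equal_solve : Prop := ∀ (a : Int), Dom_solve a → Spec_solve a (solve a)

-- ===== LEMMAS AND PROOFS =====

-- proof-irrelevant congruence for the hypothesis-carrying loops
lemma loopA_congr (a n n' mult mult' : ℤ) (hn : n = n') (hm : mult = mult')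
    (p1 : 1 ≤ n) (p2 : 1 ≤ mult) (q1 : 1 ≤ n') (q2 : 1 ≤ mult') :
    solveLoopA a n mult p1 p2 = solveLoopA a n' mult' q1 q2 := by
  subst hn; subst hm; rfl

lemma loopB_congr (q q' n n' : ℤ) (hq : q = q') (hn : n = n')
    (p1 : 1 ≤ q) (p2 : 1 ≤ n) (r1 : 1 ≤ q') (r2 : 1 ≤ n') :
    solveLoopB q n p1 p2 = solveLoopB q' n' r1 r2 := by
  subst hq; subst hn; rfl

lemma factZ_succ (n : ℕ) : ((Nat.factorial n : ℕ) : ℤ) * ((n:ℤ) + 1) = ((Nat.factorial (n+1) : ℕ) : ℤ) := by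
  rw [Nat.factorial_succ]; push_cast; ring

lemma factZ_pos (n : ℕ) : (0:ℤ) < ((Nat.factorial n : ℕ) : ℤ) := by
  exact_mod_cast Nat.factorial_pos n

-- A's loop returns m when a = m!  (invariant: mult = n!, n ≤ m)
lemma loopA_eq (a : Int) (m : ℕ) : ∀ k n : ℕ, m - n = k → 1 ≤ n → n ≤ m →
    ((Nat.factorial m : ℕ) : ℤ) = a →
    ∀ (h1 : (1:ℤ) ≤ (n:ℤ)) (h2 : (1:ℤ) ≤ ((Nat.factorial n : ℕ) : ℤ)),
      solveLoopA a (n : ℤ) ((Nat.factorial n : ℕ) : ℤ) h1 h2 = (m : ℤ) := by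
  intro k
  induction k with
  | zero =>
    intro n hk hn hnm ha h1 h2
    have hnm' : n = m := by omega
    subst hnm' ha
    rw [solveLoopA]
    simp
  | succ k ih =>
    intro n hk hn hnm ha h1 h2
    have hlt : n < m := by omega
    have hfl : Nat.factorial n < Nat.factorial m := (Nat.factorial_lt (by omega)).mpr hlt
    rw [solveLoopA]
    have hcond : ((Nat.factorial n : ℕ) : ℤ) < a := by rw [← ha]; exact_mod_cast hfl
    rw [dif_pos hcond]
    have hrec := ih (n + 1) (by omega) (by omega) (by omega) ha
      (by push_cast; omega)
      (by exact_mod_cast Nat.one_le_iff_ne_zero.mpr (Nat.factorial_ne_zero (n+1)))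
    exact (loopA_congr a _ _ _ _ (by push_cast; ring) (factZ_succ n) _ _ _ _).trans hrec

-- A's loop returns -1 when a is no factorial m! with m ≥ n
lemma loopA_neg (a : Int) : ∀ t : ℕ, ∀ n : ℕ, (a - ((Nat.factorial n : ℕ) : ℤ)).toNat ≤ t → 1 ≤ n →
    (∀ m : ℕ, n ≤ m → ((Nat.factorial m : ℕ) : ℤ) ≠ a) →
    ∀ (h1 : (1:ℤ) ≤ (n:ℤ)) (h2 : (1:ℤ) ≤ ((Nat.factorial n : ℕ) : ℤ)),
      solveLoopA a (n : ℤ) ((Nat.factorial n : ℕ) : ℤ) h1 h2 = -1 := by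
  intro t
  induction t with
  | zero =>
    intro n ht hn ha h1 h2
    rw [solveLoopA]
    rw [dif_neg (by omega)]
    simp [ha n le_rfl]
  | succ t ih =>
    intro n ht hn ha h1 h2
    rw [solveLoopA]
    by_cases hcond : ((Nat.factorial n : ℕ) : ℤ) < a
    · rw [dif_pos hcond]
      have hgrow : ((Nat.factorial n : ℕ) : ℤ) < ((Nat.factorial (n+1) : ℕ) : ℤ) := by
        exact_mod_cast (Nat.factorial_lt (by omega)).mpr (by omega)
      have hrec := ih (n + 1) (by omega) (by omega)
        (fun m hm => ha m (by omega))
        (by push_cast; omega)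
        (by exact_mod_cast Nat.one_le_iff_ne_zero.mpr (Nat.factorial_ne_zero (n+1)))
      exact (loopA_congr a _ _ _ _ (by push_cast; ring) (factZ_succ n) _ _ _ _).trans hrec
    · rw [dif_neg hcond]
      simp [ha n le_rfl]

-- B's loop returns m when q * n! = m!
lemma loopB_eq : ∀ k n m : ℕ, m - n = k → 1 ≤ n → n ≤ m → ∀ (q : ℤ),
    q * ((Nat.factorial n : ℕ) : ℤ) = ((Nat.factorial m : ℕ) : ℤ) →
    ∀ (hq : (1:ℤ) ≤ q) (hn : (1:ℤ) ≤ (n:ℤ)),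
      solveLoopB q (n : ℤ) hq hn = (m : ℤ) := by
  intro k
  induction k with
  | zero =>
    intro n m hk hn hnm q hqn hq hn'
    have hnm' : n = m := by omega
    subst hnm'
    have hq1 : q = 1 := by nlinarith [factZ_pos n]
    subst hq1
    rw [solveLoopB]
    simp
  | succ k ih =>
    intro n m hk hn hnm q hqn hq hn'
    have hlt : n < m := by omega
    have hfpos := factZ_pos n
    have hf1pos := factZ_pos (n+1)
    have hfl := factZ_succ n
    have hdvdN : Nat.factorial (n+1) ∣ Nat.factorial m := Nat.factorial_dvd_factorial (by omega)
    obtain ⟨c, hc⟩ := hdvdN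
    have hcZ : ((Nat.factorial m : ℕ) : ℤ) = ((Nat.factorial (n+1) : ℕ) : ℤ) * (c : ℤ) := by
      exact_mod_cast hc
    have hcpos : (0:ℤ) < (c : ℤ) := by
      have h0 : c ≠ 0 := by
        intro h0; rw [h0, Nat.mul_zero] at hc; exact (Nat.factorial_ne_zero m) hc
      exact_mod_cast Nat.pos_of_ne_zero h0
    have hqc : q = ((n:ℤ)+1) * (c:ℤ) := by
      have h : q * ((Nat.factorial n : ℕ) : ℤ) = (((n:ℤ)+1) * (c:ℤ)) * ((Nat.factorial n : ℕ) : ℤ) := by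
        rw [hqn, hcZ, ← hfl]; ring
      exact mul_right_cancel₀ (by omega) h
    have hq1 : 1 < q := by nlinarith
    rw [solveLoopB]
    rw [dif_pos hq1]
    have hmod0 : PySem.Int.mod q ((n:ℤ)+1) = 0 :=
      (PySem.Int.mod_eq_zero_iff_dvd q _).mpr ⟨(c:ℤ), hqc⟩
    rw [dif_neg (not_not.mpr hmod0)]
    have hdivc : PySem.Int.floordiv q ((n:ℤ)+1) = (c:ℤ) := by
      rw [PySem.Int.floordiv_eq_ediv_of_pos (by omega), hqc,
        Int.mul_ediv_cancel_left _ (by omega)]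
    have hrec := ih (n+1) m (by omega) (by omega) (by omega) (c:ℤ)
      (by rw [hcZ]; ring) (by omega) (by push_cast; omega)
    exact (loopB_congr _ _ _ _ hdivc (by push_cast; ring) _ _ _ _).trans hrec

-- B's loop returns -1 when q * n! is no factorial
lemma loopB_neg : ∀ t : ℕ, ∀ (q : ℤ) (n : ℕ), q.toNat ≤ t → 1 ≤ n →
    (∀ m : ℕ, n ≤ m → q * ((Nat.factorial n : ℕ) : ℤ) ≠ ((Nat.factorial m : ℕ) : ℤ)) →
    ∀ (hq : (1:ℤ) ≤ q) (hn : (1:ℤ) ≤ (n:ℤ)),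
      solveLoopB q (n : ℤ) hq hn = -1 := by
  intro t
  induction t with
  | zero => intro q n ht; omega
  | succ t ih =>
    intro q n ht hn1 ha hq hn'
    rw [solveLoopB]
    by_cases hq1 : 1 < q
    · rw [dif_pos hq1]
      by_cases hmod : PySem.Int.mod q ((n:ℤ)+1) ≠ 0
      · rw [dif_pos hmod]
      · rw [dif_neg hmod]
        push_neg at hmod
        obtain ⟨c, hc⟩ := (PySem.Int.mod_eq_zero_iff_dvd q _).mp hmod
        have hcpos : 1 ≤ c := by nlinarith
        have hcq : c < q := by nlinarith
        have hdivc : PySem.Int.floordiv q ((n:ℤ)+1) = c := by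
          rw [PySem.Int.floordiv_eq_ediv_of_pos (by omega), hc,
            Int.mul_ediv_cancel_left _ (by omega)]
        have hfl := factZ_succ n
        have ha' : ∀ m : ℕ, n + 1 ≤ m → c * ((Nat.factorial (n+1) : ℕ) : ℤ) ≠ ((Nat.factorial m : ℕ) : ℤ) := by
          intro m hm heq
          apply ha m (by omega)
          rw [hc, ← heq, ← hfl]; ring
        have hrec := ih c (n+1) (by omega) (by omega) ha' hcpos (by push_cast; omega)
        exact (loopB_congr _ _ _ _ hdivc (by push_cast; ring) _ _ _ _).trans hrec
    · rw [dif_neg hq1]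
      have hq' : q = 1 := by omega
      exfalso
      exact ha n le_rfl (by rw [hq']; ring)

lemma fact_one_int : ((Nat.factorial 1 : ℕ) : ℤ) = 1 := by norm_num [Nat.factorial]

-- ===== VERDICT (by name: the statement is the Claim_ definition above) =====
theorem solve_spec : Claim_equal_solve := by
  intro a _
  unfold Spec_solve solve solve_alt
  by_cases hlt : a < 1
  · rw [dif_pos hlt]
    have h := loopA_neg a (a - 1).toNat 1 (by norm_num [Nat.factorial]) le_rfl
      (fun m _ => by have := factZ_pos m; intro h; omega)
      (by norm_num) (by norm_num [Nat.factorial])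
    simpa [Nat.factorial] using h
  · rw [dif_neg hlt]
    push_neg at hlt
    by_cases hex : ∃ m : ℕ, 1 ≤ m ∧ ((Nat.factorial m : ℕ) : ℤ) = a
    · obtain ⟨m, hm1, hma⟩ := hex
      have hA := loopA_eq a m (m - 1) 1 (by omega) (by norm_num) hm1 hma
        (by norm_num) (by norm_num [Nat.factorial])
      have hB := loopB_eq (m - 1) 1 m (by omega) le_rfl hm1 a
        (by rw [fact_one_int, mul_one]; exact hma.symm) hlt (by norm_num)
      simp only [Nat.cast_one, fact_one_int] at hA hB
      rw [hA, hB]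
    · push_neg at hex
      have hA := loopA_neg a (a - 1).toNat 1 (by norm_num [Nat.factorial]) le_rfl
        (fun m hm => hex m hm) (by norm_num) (by norm_num [Nat.factorial])
      have hB := loopB_neg a.toNat a 1 le_rfl le_rfl
        (fun m hm => by rw [fact_one_int, mul_one]; exact fun h => hex m hm h.symm)
        hlt (by norm_num)
      simp only [Nat.cast_one, fact_one_int] at hA hB
      rw [hA, hB]
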